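-- pv_equiv track=rewrite | github.com/Srirag-c-r/dealGOAT | backend/recommendations/sidba_engine.py | extract_longevity_priority
-- ===== SOURCE A (Python) =====
-- def extract_longevity_priority(text: str) -> int:
--     """Extract longevity/future-proof priority (1-5 scale)"""
--     text_lower = text.lower()
--
--     high_priority_keywords = ['future-proof', 'futureproof', 'long-term', 'long term', 'durable', 'last long']
--     medium_priority_keywords = ['good for years', 'reliable', 'quality']
--
--     if any(kw in text_lower for kw in high_priority_keywords):
--         return 5
--     elif any(kw in text_lower for kw in medium_priority_keywords):
--         return 3
--
--     return 2  # Default moderate priority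
-- ===== SOURCE B (Python) =====
-- _SCORED_KEYWORDS = [
--     ('future-proof', 5), ('futureproof', 5), ('long-term', 5),
--     ('long term', 5), ('durable', 5), ('last long', 5),
--     ('good for years', 3), ('reliable', 3), ('quality', 3),
-- ]
--
-- def extract_longevity_priority(text: str) -> int:
--     """Extract longevity/future-proof priority (1-5 scale)"""
--     text_lower = text.lower()
--     best = 2
--     for kw, score in _SCORED_KEYWORDS:
--         if kw in text_lower:
--             best = max(best, score)
--     return best
-- ===== Notes on version B (the rewrite author's own statement) =====
-- stated objective: simpler
-- what changed: Replaces the two-tier if/elif-any chain by a single (keyword, score) table and one max reduction over matching keywords with default 2, relying on 5 > 3 > 2 to reproduce the tier precedence.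
import Mathlib
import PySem

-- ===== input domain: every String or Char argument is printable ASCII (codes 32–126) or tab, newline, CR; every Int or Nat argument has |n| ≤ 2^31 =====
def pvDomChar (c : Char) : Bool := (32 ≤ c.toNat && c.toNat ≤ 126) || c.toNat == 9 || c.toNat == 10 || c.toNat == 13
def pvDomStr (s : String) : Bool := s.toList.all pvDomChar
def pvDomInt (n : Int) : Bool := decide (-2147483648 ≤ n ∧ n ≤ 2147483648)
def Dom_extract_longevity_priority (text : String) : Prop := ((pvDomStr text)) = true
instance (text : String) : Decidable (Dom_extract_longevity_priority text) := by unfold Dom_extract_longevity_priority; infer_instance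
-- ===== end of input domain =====

-- B replaces A's two-tier if/elif-any chain by a single (keyword, score) table folded with max (default 2); same substring tests, simpler decomposition.


-- ===== PORT A =====
def extract_longevity_priority (text : String) : Int :=
  let text_lower := PySem.Str.lower text
  let high_priority_keywords := ["future-proof", "futureproof", "long-term", "long term", "durable", "last long"]
  let medium_priority_keywords := ["good for years", "reliable", "quality"]
  if high_priority_keywords.any (fun kw => PySem.Str.isIn kw text_lower) then 5
  else if medium_priority_keywords.any (fun kw => PySem.Str.isIn kw text_lower) then 3
  else 2

-- ===== PORT B =====
def scoredKeywords : List (String × Int) :=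
  [("future-proof", 5), ("futureproof", 5), ("long-term", 5),
   ("long term", 5), ("durable", 5), ("last long", 5),
   ("good for years", 3), ("reliable", 3), ("quality", 3)]

def extract_longevity_priority_alt (text : String) : Int :=
  let text_lower := PySem.Str.lower text
  scoredKeywords.foldl (fun best p => if PySem.Str.isIn p.1 text_lower then max best p.2 else best) 2

-- ===== PRECONDITION & SPEC =====
def Spec_extract_longevity_priority (text : String) (out : Int) : Prop := out = extract_longevity_priority_alt text
instance (text : String) (out : Int) : Decidable (Spec_extract_longevity_priority text out) := by unfold Spec_extract_longevity_priority; infer_instance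

-- ===== CLAIM (what is proved, stated in full; the proofs are below) =====
def Claim_equal_extract_longevity_priority : Prop := ∀ (text : String), Dom_extract_longevity_priority text → Spec_extract_longevity_priority text (extract_longevity_priority text)

-- ===== LEMMAS AND PROOFS =====

-- ===== VERDICT (by name: the statement is the Claim_ definition above) =====
-- ===== VERDICT (by name: the statement is the Claim_ definition above) =====
-- (lemmas)
theorem foldl_const_score (f : String → Bool) (c : Int) (l : List String) (acc : Int) :
    (l.map (fun kw => (kw, c))).foldl (fun best p => if f p.1 then max best p.2 else best) acc
      = if l.any f then max acc c else acc := by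
  induction l generalizing acc with
  | nil => simp
  | cons kw tl ih =>
    simp only [List.map, List.foldl, List.any]
    rcases Bool.eq_false_or_eq_true (f kw) with h | h <;> simp [h, ih]

theorem tbl (f : String → Bool) :
    (if ["future-proof", "futureproof", "long-term", "long term", "durable", "last long"].any f then (5:Int)
     else if ["good for years", "reliable", "quality"].any f then 3 else 2)
  = scoredKeywords.foldl (fun best p => if f p.1 then max best p.2 else best) 2 := by
  have hsplit : scoredKeywords
      = (["future-proof", "futureproof", "long-term", "long term", "durable", "last long"].map (fun kw => (kw, (5:Int))))
        ++ (["good for years", "reliable", "quality"].map (fun kw => (kw, (3:Int)))) := rfl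
  rw [hsplit, List.foldl_append, foldl_const_score, foldl_const_score]
  rcases Bool.eq_false_or_eq_true (["future-proof", "futureproof", "long-term", "long term", "durable", "last long"].any f) with hH | hH <;>
  rcases Bool.eq_false_or_eq_true (["good for years", "reliable", "quality"].any f) with hM | hM <;>
    simp [hH, hM]

theorem extract_longevity_priority_spec : Claim_equal_extract_longevity_priority := by
  intro text _
  unfold Spec_extract_longevity_priority extract_longevity_priority extract_longevity_priority_alt
  exact tbl (fun kw => PySem.Str.isIn kw (PySem.Str.lower text))
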